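-- pv_equiv track=rewrite | github.com/yujischuster/ds-and-algorithms | cmu15-112/week3/hw3-practice.py | is_valid_hand
-- ===== SOURCE A (Python) =====
-- def is_valid_hand(s):
--     n = 0
--     for s1 in s:
--         if n % 3 == 0:
--             if (s1 == "T" or
--                 s1 == "J" or
--                 s1 == "Q" or
--                 s1 == "K" or
--                 s1 == "A" or
--                 s1 == "2" or
--                 s1 == "3" or
--                 s1 == "4" or
--                 s1 == "5" or
--                 s1 == "6" or
--                 s1 == "7" or
--                 s1 == "8" or
--                 s1 == "9"
--             ):
--                 pass
--             else:
--                 return False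
--         elif (n == 1 or
--                 n == 4 or
--                 n == 7 or
--                 n == 10 or
--                 n == 13
--         ):
--             if (s1 == "D" or
--                 s1 == "S" or
--                 s1 == "H" or
--                 s1 == "C"
--             ):
--                 pass
--             else:
--                 return False
--         elif (n == 2 or
--             n == 5 or
--             n == 8 or
--             n == 11
--         ):
--             if not s1.isspace():
--                 return False
--         n += 1
--         if n == 14:
--             return True
-- ===== SOURCE B (Python) =====
-- RANKS = "TJQKA23456789"
-- SUITS = "DSHC"
--
--
-- def is_valid_hand(s):
--     # Examine the three strided position classes directly instead of a
--     # counter-driven single pass.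
--     if any(c not in RANKS for c in s[0:13:3]):
--         return False
--     if any(c not in SUITS for c in s[1:14:3]):
--         return False
--     if any(not c.isspace() for c in s[2:12:3]):
--         return False
--     return len(s) >= 14
-- ===== Notes on version B (the rewrite author's own statement) =====
-- stated objective: simpler
-- what changed: Replaces A's counter-driven single pass with n%3 branch dispatch by three independent checks of the strided position classes (ranks s[0:13:3], suits s[1:14:3], separators s[2:12:3]) followed by a length test.
-- outside the precondition, e.g. on is_valid_hand(''): A returns None, B returns False; on is_valid_hand('2D 3H'): A returns None, B returns False
import Mathlib
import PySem

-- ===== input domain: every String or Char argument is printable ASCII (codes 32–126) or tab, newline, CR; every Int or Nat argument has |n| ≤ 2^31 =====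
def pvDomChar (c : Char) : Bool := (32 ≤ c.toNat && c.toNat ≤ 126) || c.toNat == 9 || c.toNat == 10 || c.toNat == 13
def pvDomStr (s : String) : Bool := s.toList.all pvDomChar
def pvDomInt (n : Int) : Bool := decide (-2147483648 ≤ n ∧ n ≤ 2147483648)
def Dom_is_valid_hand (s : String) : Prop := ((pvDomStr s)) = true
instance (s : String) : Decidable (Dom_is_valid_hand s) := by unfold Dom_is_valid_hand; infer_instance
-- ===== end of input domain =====

-- B replaces A's counter-driven single pass (branching on n % 3) by validating the three
-- strided position classes (ranks / suits / separators) separately: simpler decomposition.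

-- ===== PORT A =====
-- A's loop: state = remaining characters and the counter n; returns none where the Python
-- loop falls through and the function returns None (those inputs are excluded by Pre_ below)
def pvAloop : List Char → Nat → Option Bool
  | [], _ => none
  | c :: rest, n =>
    if n % 3 == 0 then
      if c == 'T' || c == 'J' || c == 'Q' || c == 'K' || c == 'A' || c == '2' || c == '3' ||
         c == '4' || c == '5' || c == '6' || c == '7' || c == '8' || c == '9' then
        if n + 1 == 14 then some true else pvAloop rest (n + 1)
      else some false
    else if n == 1 || n == 4 || n == 7 || n == 10 || n == 13 then
      if c == 'D' || c == 'S' || c == 'H' || c == 'C' then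
        if n + 1 == 14 then some true else pvAloop rest (n + 1)
      else some false
    else if n == 2 || n == 5 || n == 8 || n == 11 then
      if !(PySem.Chars.isspace c) then some false
      else if n + 1 == 14 then some true else pvAloop rest (n + 1)
    else
      if n + 1 == 14 then some true else pvAloop rest (n + 1)

def is_valid_hand (s : String) : Bool := (pvAloop s.toList 0).getD false

-- ===== PORT B =====
-- hand port of CPython's step-3 string slice: pvEvery3 keeps every 3rd element, so
-- pvStride3 cs a b = cs[a:b:3] — exact for 0 ≤ a ≤ b (positive step, clamped bounds)
def pvEvery3 : List Char → List Char
  | [] => []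
  | [c] => [c]
  | [c, _] => [c]
  | c :: _ :: _ :: rest => c :: pvEvery3 rest

def pvStride3 (cs : List Char) (a b : Nat) : List Char := pvEvery3 ((cs.drop a).take (b - a))

def pvRanks : List Char := ['T', 'J', 'Q', 'K', 'A', '2', '3', '4', '5', '6', '7', '8', '9']
def pvSuits : List Char := ['D', 'S', 'H', 'C']

def is_valid_hand_alt (s : String) : Bool :=
  let cs := s.toList
  if (pvStride3 cs 0 13).any (fun c => !(pvRanks.contains c)) then false
  else if (pvStride3 cs 1 14).any (fun c => !(pvSuits.contains c)) then false
  else if (pvStride3 cs 2 12).any (fun c => !(PySem.Chars.isspace c)) then false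
  else decide (14 ≤ cs.length)

-- ===== PRECONDITION & SPEC =====
-- whether the character at position i violates A's check for that position class
def pvPosBad (i : Nat) (c : Char) : Bool :=
  if i % 3 == 0 then !(pvRanks.contains c)
  else if i % 3 == 1 then !(pvSuits.contains c)
  else !(PySem.Chars.isspace c)

-- Pre_ excludes strings shorter than 14 whose checked positions are all valid: there the
-- Python A falls off its loop and returns None, which is not a bool.
def Pre_is_valid_hand (s : String) : Prop :=
  14 ≤ s.toList.length ∨ (s.toList.take 14).zipIdx.any (fun p => pvPosBad p.2 p.1) = true
instance (s : String) : Decidable (Pre_is_valid_hand s) := by unfold Pre_is_valid_hand; infer_instance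

def pvWitness_is_valid_hand : String := "0"

def Spec_is_valid_hand (s : String) (out : Bool) : Prop := out = is_valid_hand_alt s
instance (s : String) (out : Bool) : Decidable (Spec_is_valid_hand s out) := by unfold Spec_is_valid_hand; infer_instance

-- ===== CLAIM (what is proved, stated in full; the proofs are below) =====
def Claim_equal_is_valid_hand : Prop := ∀ (s : String), Dom_is_valid_hand s → Pre_is_valid_hand s → Spec_is_valid_hand s (is_valid_hand s)

-- ===== LEMMAS AND PROOFS =====
theorem rank_contains (c : Char) : pvRanks.contains c =
    (c == 'T' || c == 'J' || c == 'Q' || c == 'K' || c == 'A' || c == '2' || c == '3' ||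
     c == '4' || c == '5' || c == '6' || c == '7' || c == '8' || c == '9') := by
  simp only [pvRanks, List.contains_cons, List.contains_nil, Bool.or_false]
  rw [Bool.eq_iff_iff]; simp [Bool.or_assoc]

theorem suit_contains (c : Char) : pvSuits.contains c =
    (c == 'D' || c == 'S' || c == 'H' || c == 'C') := by
  simp only [pvSuits, List.contains_cons, List.contains_nil, Bool.or_false]
  rw [Bool.eq_iff_iff]; simp [Bool.or_assoc]

theorem iteFlip (b : Bool) (x y : Option Bool) : (if b then x else y) = if !b then y else x := by
  cases b <;> rfl

-- uniform view of A's loop body: at every n < 14 the branch taken is the class of n % 3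
def pvScan : List Char → Nat → Option Bool
  | [], _ => none
  | c :: rest, n =>
    if pvPosBad n c then some false
    else if n + 1 == 14 then some true else pvScan rest (n + 1)

theorem pvAloop_step (n : Nat) (hn : n < 14) (c : Char) (rest : List Char) :
    pvAloop (c :: rest) n =
      if pvPosBad n c then some false
      else if n + 1 == 14 then some true else pvAloop rest (n + 1) := by
  have h3 : n % 3 = 0 ∨ n % 3 = 1 ∨ n % 3 = 2 := by omega
  rcases h3 with h | h | h
  · have hb : pvPosBad n c = !(c == 'T' || c == 'J' || c == 'Q' || c == 'K' || c == 'A' ||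
        c == '2' || c == '3' || c == '4' || c == '5' || c == '6' || c == '7' || c == '8' ||
        c == '9') := by
      rw [pvPosBad, if_pos (by simp [h]), rank_contains]
    rw [hb]
    simp only [pvAloop]
    rw [if_pos (by simp [h] : (n % 3 == 0) = true), iteFlip]
  · have hsel : (n == 1 || n == 4 || n == 7 || n == 10 || n == 13) = true := by
      simp only [Bool.or_eq_true, beq_iff_eq]; omega
    have hb : pvPosBad n c = !(c == 'D' || c == 'S' || c == 'H' || c == 'C') := by
      rw [pvPosBad, if_neg (by simp [h]), if_pos (by simp [h]), suit_contains]
    rw [hb]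
    simp only [pvAloop]
    rw [if_neg (by simp [h] : ¬ (n % 3 == 0) = true), if_pos hsel, iteFlip]
  · have hsel : (n == 2 || n == 5 || n == 8 || n == 11) = true := by
      simp only [Bool.or_eq_true, beq_iff_eq]; omega
    have hsel1 : ¬ (n == 1 || n == 4 || n == 7 || n == 10 || n == 13) = true := by
      simp only [Bool.or_eq_true, beq_iff_eq]; omega
    have hb : pvPosBad n c = !(PySem.Chars.isspace c) := by
      rw [pvPosBad, if_neg (by simp [h]), if_neg (by simp [h])]
    rw [hb]
    simp only [pvAloop]
    rw [if_neg (by simp [h] : ¬ (n % 3 == 0) = true), if_neg hsel1, if_pos hsel]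

theorem pvAloop_eq_scan (cs : List Char) : ∀ n : Nat, n < 14 → pvAloop cs n = pvScan cs n := by
  induction cs with
  | nil => intro n _; rfl
  | cons c rest ih =>
    intro n hn
    rw [pvAloop_step n hn c rest]
    show _ = pvScan (c :: rest) n
    simp only [pvScan]
    by_cases h14 : n + 1 = 14
    · simp [h14]
    · rw [ih (n + 1) (by omega)]

theorem pvEvery3_cons (a : Char) (l : List Char) :
    pvEvery3 (a :: l) = a :: pvEvery3 (l.drop 2) := by
  match l with
  | [] => rfl
  | [b] => rfl
  | b :: e :: l' => rfl

-- B's checks restricted to a window of m positions still to be consumed before A would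
-- return True; pvBwin cs 14 is exactly B
def pvBwin (cs : List Char) (m : Nat) : Bool :=
  if (pvEvery3 (cs.take (m - 1))).any (fun c => !(pvRanks.contains c)) then false
  else if (pvEvery3 ((cs.drop 1).take (m - 1))).any (fun c => !(pvSuits.contains c)) then false
  else if (pvEvery3 ((cs.drop 2).take (m - 4))).any (fun c => !(PySem.Chars.isspace c)) then false
  else decide (m ≤ cs.length)

theorem alt_eq_bwin (s : String) : is_valid_hand_alt s = pvBwin s.toList 14 := by
  simp [is_valid_hand_alt, pvBwin, pvStride3]

theorem scan_eq_bwin : ∀ k : Nat, k ≤ 4 → ∀ cs : List Char,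
    (pvScan cs (12 - 3 * k)).getD false = pvBwin cs (3 * k + 2) := by
  intro k
  induction k with
  | zero =>
    intro _ cs
    match cs with
    | [] => decide
    | [c] =>
      by_cases hR : c ∈ pvRanks <;>
        simp [pvScan, pvBwin, pvPosBad, pvEvery3, hR]
    | c :: d :: rest =>
      have hlen : (2 : Nat) ≤ rest.length + 2 := by omega
      by_cases hR : c ∈ pvRanks <;> by_cases hS : d ∈ pvSuits <;>
        simp [pvScan, pvBwin, pvPosBad, pvEvery3, hR, hS, hlen]
  | succ k ih =>
    intro hk cs
    have hk3 : k ≤ 3 := by omega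
    have hn : 12 - 3 * (k + 1) = 9 - 3 * k := by omega
    rw [hn]
    -- the position-class of the three head positions
    have hb0 : ∀ c, pvPosBad (9 - 3 * k) c = !(pvRanks.contains c) := by
      intro c
      rw [pvPosBad, if_pos (by simp only [beq_iff_eq, beq_eq_false_iff_ne, ne_eq] <;> omega)]
    have hb1 : ∀ c, pvPosBad (9 - 3 * k + 1) c = !(pvSuits.contains c) := by
      intro c
      rw [pvPosBad, if_neg (by simp only [beq_iff_eq, beq_eq_false_iff_ne, ne_eq] <;> omega),
        if_pos (by simp only [beq_iff_eq, beq_eq_false_iff_ne, ne_eq] <;> omega)]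
    have hb2 : ∀ c, pvPosBad (9 - 3 * k + 2) c = !(PySem.Chars.isspace c) := by
      intro c
      rw [pvPosBad, if_neg (by simp only [beq_iff_eq, beq_eq_false_iff_ne, ne_eq] <;> omega),
        if_neg (by simp only [beq_iff_eq, beq_eq_false_iff_ne, ne_eq] <;> omega)]
    -- the n+1 == 14 tests are all false at these positions
    have h14a : ((9 - 3 * k) + 1 == 14) = false := by
      simp only [beq_iff_eq, beq_eq_false_iff_ne, ne_eq] <;> omega
    have h14b : ((9 - 3 * k + 1) + 1 == 14) = false := by
      simp only [beq_iff_eq, beq_eq_false_iff_ne, ne_eq] <;> omega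
    have h14c : ((9 - 3 * k + 2) + 1 == 14) = false := by
      simp only [beq_iff_eq, beq_eq_false_iff_ne, ne_eq] <;> omega
    match cs with
    | [] =>
      have : ¬ (3 * (k + 1) + 2 ≤ ([] : List Char).length) := by simp <;> omega
      simp [pvScan, pvBwin, pvEvery3, this]
    | [c] =>
      have : ¬ (3 * (k + 1) + 2 ≤ ([c] : List Char).length) := by simp <;> omega
      have ht : 3 * (k + 1) + 2 - 1 = (3 * k + 3) + 1 := by omega
      by_cases hR : c ∈ pvRanks <;>
        simp [pvScan, pvBwin, pvEvery3, hb0, hR, h14a, this, ht]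
    | [c, d] =>
      have : ¬ (3 * (k + 1) + 2 ≤ ([c, d] : List Char).length) := by simp <;> omega
      have ht : 3 * (k + 1) + 2 - 1 = (3 * k + 3) + 1 := by omega
      by_cases hR : c ∈ pvRanks <;> by_cases hS : d ∈ pvSuits <;>
        simp [pvScan, pvBwin, pvEvery3, hb0, hb1, hR, hS, h14a, h14b, this, ht]
    | c :: d :: e :: rest =>
      -- left side: unroll three steps of the scan
      have hL : (pvScan (c :: d :: e :: rest) (9 - 3 * k)).getD false =
          (if !(pvRanks.contains c) then false
           else if !(pvSuits.contains d) then false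
           else if !(PySem.Chars.isspace e) then false
           else pvBwin rest (3 * k + 2)) := by
        have hstep : 9 - 3 * k + 2 + 1 = 12 - 3 * k := by omega
        have h14d : ((12 - 3 * k) == 14) = false := by
          simp only [beq_iff_eq, beq_eq_false_iff_ne, ne_eq] <;> omega
        simp only [pvScan, hb0, hb1, hb2, h14a, h14b, h14c, Bool.false_eq_true, if_false,
          hstep, h14d, apply_ite (fun o : Option Bool => o.getD false), Option.getD_some]
        rw [ih (by omega) rest]
      rw [hL]
      -- right side: peel the three head characters off each strided window
      have ht1 : 3 * (k + 1) + 2 - 1 = (3 * k + 1) + 3 := by omega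
      have ht2 : 3 * (k + 1) + 2 - 4 = (3 * k) + 1 := by omega
      have hw1 : pvEvery3 ((c :: d :: e :: rest).take (3 * (k + 1) + 2 - 1)) =
          c :: pvEvery3 (rest.take (3 * k + 1)) := by
        rw [ht1]
        simp [List.take_succ_cons, pvEvery3_cons]
      have hw2 : pvEvery3 (((c :: d :: e :: rest).drop 1).take (3 * (k + 1) + 2 - 1)) =
          d :: pvEvery3 ((rest.drop 1).take (3 * k + 1)) := by
        rw [ht1]
        simp [List.take_succ_cons, pvEvery3_cons, List.drop_take]
      have hw3 : pvEvery3 (((c :: d :: e :: rest).drop 2).take (3 * (k + 1) + 2 - 4)) =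
          e :: pvEvery3 ((rest.drop 2).take (3 * k + 2 - 4)) := by
        rw [ht2]
        have : 3 * k + 2 - 4 = 3 * k - 2 := by omega
        simp [List.take_succ_cons, pvEvery3_cons, List.drop_take, this]
      have hlen : (3 * (k + 1) + 2 ≤ (c :: d :: e :: rest).length) ↔ (3 * k + 2 ≤ rest.length) := by
        simp <;> omega
      have hdec : decide (3 * (k + 1) + 2 ≤ (c :: d :: e :: rest).length) =
          decide (3 * k + 2 ≤ rest.length) := decide_eq_decide.mpr hlen
      conv_rhs => rw [pvBwin]
      rw [hw1, hw2, hw3, hdec]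
      by_cases hR : c ∈ pvRanks <;> by_cases hS : d ∈ pvSuits <;>
        cases hsp : PySem.Chars.isspace e <;>
        simp [pvBwin, hR, hS, hsp]

theorem main_eq (s : String) : is_valid_hand s = is_valid_hand_alt s := by
  have h := scan_eq_bwin 4 (by omega) s.toList
  simp only [show 12 - 3 * 4 = 0 from rfl, show 3 * 4 + 2 = 14 from rfl] at h
  rw [is_valid_hand, pvAloop_eq_scan _ 0 (by omega), alt_eq_bwin, h]

-- ===== VERDICT (by name: the statement is the Claim_ definition above) =====
theorem is_valid_hand_spec : Claim_equal_is_valid_hand := by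
  intro s _ _
  unfold Spec_is_valid_hand
  exact main_eq s
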